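-- pv_equiv track=rewrite | github.com/LeonCrashCode/SemanticParsing | utils.py | packed_data
-- ===== SOURCE A (Python) =====
-- def packed_data(trn_instances, batch_size):
-- 	packed_instances = []
-- 	packed_instance = []
-- 	packed_lengths = []
-- 	packed_length = []
-- 	packed_idx = 0
-- 	max_length = len(trn_instances[0][0])
-- 	for instance in trn_instances:
-- 		if packed_idx != 0 and packed_idx % 100 == 0:
-- 			packed_instances.append(packed_instance)
-- 			packed_lengths.append(packed_length)
-- 			packed_instance = []
-- 			packed_length = []
-- 		if len(packed_instance) == 0:
-- 			max_length = len(instance[0])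
--
-- 		packed_length.append(len(instance[0]))
-- 		instance[0] += [0 for i in range(max_length-len(instance[0]))]
-- 		instance[1] += [0 for i in range(max_length-len(instance[1]))]
-- 		instance[2] += [0 for i in range(max_length-len(instance[2]))]
-- 		instance[3] += [0 for i in range(max_length-len(instance[3]))]
-- 		packed_instance.append(instance)
--
-- 		packed_idx += 1
-- 	if len(packed_instance) != 0:
-- 		packed_instances.append(packed_instance)
-- 		packed_lengths.append(packed_length)
-- 	return packed_instances, packed_lengths
-- ===== SOURCE B (Python) =====
-- def packed_data(trn_instances, batch_size):
--     packed_instances = []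
--     packed_lengths = []
--     for start in range(0, len(trn_instances), 100):
--         chunk = trn_instances[start:start + 100]
--         max_length = len(chunk[0][0])
--         packed_lengths.append([len(inst[0]) for inst in chunk])
--         for inst in chunk:
--             for i in range(4):
--                 inst[i] += [0] * (max_length - len(inst[i]))
--         packed_instances.append(chunk)
--     return packed_instances, packed_lengths
-- ===== Notes on version B (the rewrite author's own statement) =====
-- stated objective: simpler
-- what changed: Replaces the single instance-counter loop with its modulo-100 flush/reset and trailing-flush bookkeeping by an outer loop over chunk start offsets that slices each 100-instance block, reads the pad length from the block's first instance and builds the block's lengths list directly.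
import Mathlib
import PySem

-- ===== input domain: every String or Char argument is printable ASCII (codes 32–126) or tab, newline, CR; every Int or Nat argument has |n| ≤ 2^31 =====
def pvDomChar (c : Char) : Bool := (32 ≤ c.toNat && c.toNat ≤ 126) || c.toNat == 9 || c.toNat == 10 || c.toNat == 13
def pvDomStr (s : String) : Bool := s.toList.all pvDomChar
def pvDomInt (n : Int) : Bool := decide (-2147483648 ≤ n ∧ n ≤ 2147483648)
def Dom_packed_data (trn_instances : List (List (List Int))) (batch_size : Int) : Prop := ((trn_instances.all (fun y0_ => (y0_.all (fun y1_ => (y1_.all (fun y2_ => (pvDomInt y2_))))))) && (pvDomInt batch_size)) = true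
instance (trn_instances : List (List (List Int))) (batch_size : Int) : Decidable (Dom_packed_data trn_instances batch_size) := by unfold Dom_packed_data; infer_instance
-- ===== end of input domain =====

-- B replaces A's instance-counter loop (modulo-100 flush/reset + trailing flush) by an outer loop over
-- chunk start offsets slicing 100-instance blocks; same return value. Both A and B pad the instances'
-- first four field lists IN PLACE (the equivalence proved here is about the return value; B performs the
-- same mutation as A).

-- ===== PORT A =====
-- instance[i] += [0 for i in range(ml - len(instance[i]))]  (index i is in range under Pre_; out-of-range set is a no-op, exact on Pre_)
def pvPadAt (ml : Nat) (inst : List (List Int)) (i : Nat) : List (List Int) :=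
  let f := inst.getD i []
  inst.set i (f ++ List.replicate (ml - f.length) (0 : Int))

-- one iteration of A's for-loop; state = (packed_instances, packed_instance, packed_lengths, packed_length, packed_idx, max_length)
def pvStepA (s : List (List (List (List Int))) × List (List (List Int)) × List (List Int) × List Int × Nat × Nat)
    (inst : List (List Int)) :
    List (List (List (List Int))) × List (List (List Int)) × List (List Int) × List Int × Nat × Nat :=
  match s with
  | (pis, pi, pls, pl, idx, ml) =>
    let (pis, pi, pls, pl) :=
      if idx ≠ 0 ∧ idx % 100 = 0 then (pis ++ [pi], ([] : List (List (List Int))), pls ++ [pl], ([] : List Int))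
      else (pis, pi, pls, pl)
    let ml := if pi.length = 0 then (inst.getD 0 []).length else ml
    let pl := pl ++ [((inst.getD 0 []).length : Int)]
    let inst := pvPadAt ml (pvPadAt ml (pvPadAt ml (pvPadAt ml inst 0) 1) 2) 3
    (pis, pi ++ [inst], pls, pl, idx + 1, ml)

-- the trailing 'if len(packed_instance) != 0: append' and the return
def pvWrapA (s : List (List (List (List Int))) × List (List (List Int)) × List (List Int) × List Int × Nat × Nat) :
    List (List (List (List Int))) × List (List Int) :=
  match s with
  | (pis, pi, pls, pl, _, _) => if pi.length ≠ 0 then (pis ++ [pi], pls ++ [pl]) else (pis, pls)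

def packed_data (trn_instances : List (List (List Int))) (batch_size : Int) :
    List (List (List (List Int))) × List (List Int) :=
  -- max_length = len(trn_instances[0][0]) (in range under Pre_)
  pvWrapA (trn_instances.foldl pvStepA ([], [], [], [], 0, ((trn_instances.getD 0 []).getD 0 []).length))

-- ===== PORT B =====
-- for i in range(4): inst[i] += [0] * (max_length - len(inst[i]))
def pvPadB (ml : Nat) (inst : List (List Int)) : List (List Int) :=
  (PySem.List.pyRange 0 4 1).foldl (fun acc i =>
    let f := acc.getD i.toNat []
    acc.set i.toNat (f ++ List.replicate (ml - f.length) (0 : Int))) inst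

-- one iteration of B's outer loop over chunk start offsets
def pvStepB (trn : List (List (List Int)))
    (acc : List (List (List (List Int))) × List (List Int)) (start : Int) :
    List (List (List (List Int))) × List (List Int) :=
  let chunk := PySem.List.slice trn (some start) (some (start + 100))
  let ml := ((chunk.getD 0 []).getD 0 []).length
  let lens := chunk.map (fun inst => ((inst.getD 0 []).length : Int))
  let chunk := chunk.map (pvPadB ml)
  (acc.1 ++ [chunk], acc.2 ++ [lens])

def packed_data_alt (trn_instances : List (List (List Int))) (batch_size : Int) :
    List (List (List (List Int))) × List (List Int) :=
  (PySem.List.pyRange 0 (trn_instances.length : Int) 100).foldl (pvStepB trn_instances) ([], [])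

-- ===== PRECONDITION & SPEC =====
-- Pre_ = exactly where the Python A returns: a nonempty list of instances each having the four
-- indexed fields (otherwise A raises IndexError at trn_instances[0][0] or at instance[0..3]).
def Pre_packed_data (trn_instances : List (List (List Int))) (batch_size : Int) : Prop :=
  trn_instances ≠ [] ∧ ∀ inst ∈ trn_instances, 4 ≤ inst.length
instance (trn_instances : List (List (List Int))) (batch_size : Int) : Decidable (Pre_packed_data trn_instances batch_size) := by unfold Pre_packed_data; infer_instance

def pvWitness_packed_data : List (List (List Int)) × Int := ([[[1], [2, 2], [3], [4]]], 0)

def Spec_packed_data (trn_instances : List (List (List Int))) (batch_size : Int) (out : List (List (List (List Int))) × List (List Int)) : Prop := out = packed_data_alt trn_instances batch_size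
instance (trn_instances : List (List (List Int))) (batch_size : Int) (out : List (List (List (List Int))) × List (List Int)) : Decidable (Spec_packed_data trn_instances batch_size out) := by unfold Spec_packed_data; infer_instance

-- ===== CLAIM (what is proved, stated in full; the proofs are below) =====
def Claim_equal_packed_data : Prop := ∀ (trn_instances : List (List (List Int))) (batch_size : Int), Dom_packed_data trn_instances batch_size → Pre_packed_data trn_instances batch_size → Spec_packed_data trn_instances batch_size (packed_data trn_instances batch_size)

-- ===== LEMMAS AND PROOFS =====

-- reference chunked recursion both ports are reduced to
def pvG (trn : List (List (List Int))) : List (List (List (List Int))) × List (List Int) :=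
  if h : trn = [] then ([], [])
  else
    let c := trn.take 100
    let ml := ((c.getD 0 []).getD 0 []).length
    let r := pvG (trn.drop 100)
    (c.map (pvPadB ml) :: r.1, c.map (fun inst => ((inst.getD 0 []).length : Int)) :: r.2)
termination_by trn.length
decreasing_by
  cases trn with
  | nil => exact absurd rfl h
  | cons a t => simp

lemma pvPadB_eq (ml : Nat) (inst : List (List Int)) :
    pvPadB ml inst = pvPadAt ml (pvPadAt ml (pvPadAt ml (pvPadAt ml inst 0) 1) 2) 3 := by
  simp [pvPadB, pvPadAt, show PySem.List.pyRange 0 4 1 = [0, 1, 2, 3] from rfl, List.foldl]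

lemma pvInner (c : List (List (List Int))) (pis : List (List (List (List Int))))
    (pi : List (List (List Int))) (pls : List (List Int)) (pl : List Int) (idx ml : Nat)
    (hpi : pi ≠ []) (hidx : ∀ k, k < c.length → (idx + k) % 100 ≠ 0) :
    c.foldl pvStepA (pis, pi, pls, pl, idx, ml) =
      (pis, pi ++ c.map (pvPadB ml), pls,
        pl ++ c.map (fun inst => ((inst.getD 0 []).length : Int)), idx + c.length, ml) := by
  induction c generalizing pi pl idx with
  | nil => simp
  | cons a t ih =>
    have h0 : ¬(idx ≠ 0 ∧ idx % 100 = 0) := by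
      have := hidx 0 (by simp)
      omega
    have hlen : pi.length ≠ 0 := by simpa [List.length_eq_zero_iff] using hpi
    simp only [List.foldl_cons, pvStepA, if_neg h0, if_neg hlen]
    rw [ih _ _ _ (by simp) (fun k hk => by
      have := hidx (k + 1) (by simp; omega)
      omega)]
    simp [pvPadB_eq, List.append_assoc]
    omega

lemma pvG_nil : pvG [] = ([], []) := by rw [pvG]; simp

lemma pvAfterFirst (n : Nat) : ∀ (rest : List (List (List Int))), rest.length ≤ n →
    ∀ (x : List (List Int)) (pis : List (List (List (List Int)))) (pls : List (List Int)) (q : Nat),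
    pvWrapA (rest.foldl pvStepA
        (pis, [pvPadB ((x.getD 0 []).length) x], pls, [((x.getD 0 []).length : Int)],
          100 * q + 1, (x.getD 0 []).length)) =
      (pis ++ (pvG (x :: rest)).1, pls ++ (pvG (x :: rest)).2) := by
  induction n with
  | zero =>
    intro rest hr x pis pls q
    have : rest = [] := by simpa [List.length_eq_zero_iff] using Nat.le_zero.mp hr
    subst this
    rw [pvG]
    simp [pvWrapA, pvPadB_eq, pvG_nil, List.getD]
  | succ n ih =>
    intro rest hr x pis pls q
    set m := (x.getD 0 []).length with hm
    rcases hdrop : rest.drop 99 with _ | ⟨y, r2⟩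
    · -- last (possibly partial) chunk
      have hle : rest.length ≤ 99 := by
        have := congrArg List.length hdrop
        simp at this
        omega
      have htake2 : (x :: rest).take 100 = x :: rest := List.take_of_length_le (by simp; omega)
      have hdrop2 : (x :: rest).drop 100 = [] := List.drop_eq_nil_of_le (by simp; omega)
      rw [pvInner rest pis _ pls _ _ m (by simp) (fun k hk => by omega)]
      rw [pvG]
      simp [pvWrapA, htake2, hdrop2, pvG_nil, pvPadB_eq]
      refine ⟨⟨rfl, fun a _ => rfl⟩, rfl⟩
    · -- a full chunk of 100, flushed by the first element of the next one
      have hlen99 : (rest.take 99).length = 99 := by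
        have := congrArg List.length hdrop
        simp at this
        simp [List.length_take]
        omega
      conv_lhs => rw [show rest = rest.take 99 ++ rest.drop 99 from (List.take_append_drop 99 rest).symm,
        hdrop, List.foldl_append]
      rw [pvInner (rest.take 99) pis _ pls _ _ m (by simp)
        (fun k hk => by rw [hlen99] at hk; omega)]
      simp only [List.singleton_append, hlen99]
      rw [show 100 * q + 1 + 99 = 100 * (q + 1) from by ring]
      simp only [List.foldl_cons]
      have hflush : (100 * (q + 1) ≠ 0 ∧ 100 * (q + 1) % 100 = 0) := by omega
      simp only [pvStepA, if_pos hflush, List.length_nil, if_true,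
        List.nil_append]
      have hr2 : r2.length ≤ n := by
        have := congrArg List.length hdrop
        simp at this
        omega
      have hih := ih r2 hr2 y
        (pis ++ [pvPadB m x :: List.map (pvPadB m) (rest.take 99)])
        (pls ++ [(m : Int) :: List.map (fun inst => ((inst.getD 0 []).length : Int)) (rest.take 99)])
        (q + 1)
      simp only [pvPadB_eq] at hih ⊢
      rw [hih]
      conv_rhs => rw [pvG]
      have hdrop100 : (x :: rest).drop 100 = y :: r2 := by
        simp [hdrop, List.drop_succ_cons]
      simp [hdrop100, List.take_succ_cons, List.append_assoc, pvPadB_eq, hm, List.getD]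

lemma pvA_eq_G (trn : List (List (List Int))) (bs : Int) : packed_data trn bs = pvG trn := by
  cases trn with
  | nil => rw [pvG]; simp [packed_data, pvWrapA]
  | cons x rest =>
    have h := pvAfterFirst rest.length rest le_rfl x [] [] 0
    simp only [pvPadB_eq, Nat.mul_zero, Nat.zero_add] at h
    simp only [packed_data, List.foldl_cons, pvStepA, List.getD] at h ⊢
    simpa [List.getD] using h

lemma pvBfold (K : Nat) : ∀ (trn : List (List (List Int))) (off : Nat)
    (pis : List (List (List (List Int)))) (pls : List (List Int)),
    K = (trn.length - off + 99) / 100 →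
    ((List.range K).map (fun k : Nat => ((off : Int) + 100 * (k : Int)))).foldl (pvStepB trn) (pis, pls) =
      (pis ++ (pvG (trn.drop off)).1, pls ++ (pvG (trn.drop off)).2) := by
  induction K with
  | zero =>
    intro trn off pis pls hK
    have : trn.length ≤ off := by omega
    rw [pvG]
    simp [List.drop_eq_nil_of_le this]
  | succ K ih =>
    intro trn off pis pls hK
    have hlt : off < trn.length := by by_contra h; omega
    rw [List.range_succ_eq_map]
    simp only [List.map_cons, List.map_map, List.foldl_cons, Nat.cast_zero, mul_zero, add_zero]
    have hchunk : PySem.List.slice trn (some (off : Int)) (some ((off : Int) + 100)) =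
        (trn.drop off).take 100 := by
      have := PySem.List.slice_natCast_add trn off 100
      simpa using this
    have hstep : pvStepB trn (pis, pls) (off : Int) =
        (pis ++ [((trn.drop off).take 100).map
            (pvPadB ((((trn.drop off).take 100).getD 0 []).getD 0 []).length)],
          pls ++ [((trn.drop off).take 100).map (fun inst => ((inst.getD 0 []).length : Int))]) := by
      simp [pvStepB, hchunk]
    rw [hstep]
    have hmapeq : ((List.range K).map ((fun k : Nat => ((off : Int) + 100 * (k : Int))) ∘ Nat.succ)) =
        (List.range K).map (fun k : Nat => (((off + 100 : Nat) : Int) + 100 * (k : Int))) := by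
      apply List.map_congr_left
      intro k _
      simp [Function.comp]
      ring
    rw [hmapeq]
    rw [ih trn (off + 100) _ _ (by omega)]
    conv_rhs => rw [pvG]
    have hne : trn.drop off ≠ [] := by
      intro h
      have := congrArg List.length h
      simp at this
      omega
    simp [hne, List.drop_drop, List.append_assoc]

lemma pvB_eq_G (trn : List (List (List Int))) (bs : Int) : packed_data_alt trn bs = pvG trn := by
  unfold packed_data_alt
  rw [PySem.List.pyRange_of_pos 0 (trn.length : Int) (by norm_num)]
  rcases Nat.eq_zero_or_pos trn.length with h0 | hpos
  · rw [pvG]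
    have : trn = [] := List.length_eq_zero_iff.mp h0
    subst this
    simp
  · have hlt : (0 : Int) < (trn.length : Int) := by exact_mod_cast hpos
    rw [if_pos hlt]
    have hcount : (((trn.length : Int) - 0 + 100 - 1) / 100).toNat = (trn.length + 99) / 100 := by
      have h1 : ((trn.length : Int) - 0 + 100 - 1) = ((trn.length + 99 : Nat) : Int) := by push_cast; ring
      rw [h1, show ((100 : Int)) = ((100 : Nat) : Int) from rfl, ← Int.natCast_div, Int.toNat_natCast]
    rw [hcount]
    rw [show (fun k : Nat => (0 : Int) + 100 * (k : Int)) = (fun k : Nat => (((0 : Nat) : Int)) + 100 * (k : Int)) from by funext k; norm_num]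
    have h2 := pvBfold ((trn.length + 99) / 100) trn 0 [] [] (by omega)
    rw [List.drop_zero] at h2
    rw [h2]
    simp

-- ===== VERDICT (by name: the statement is the Claim_ definition above) =====
theorem packed_data_spec : Claim_equal_packed_data := by
  intro trn bs _ _
  unfold Spec_packed_data
  rw [pvA_eq_G trn bs, pvB_eq_G trn bs]
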